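-- pv_equiv track=rewrite | github.com/ludimus/AOC2024 | day09/solution_part2.py | find_free_spans
-- ===== SOURCE A (Python) =====
-- def find_free_spans(disk):
--     """Find all contiguous free space spans with start position and size."""
--     spans = []
--     current_start = None
--     current_size = 0
--
--     for i, block in enumerate(disk):
--         if block == '.':
--             if current_start is None:
--                 current_start = i
--                 current_size = 1
--             else:
--                 current_size += 1
--         else:
--             # End of free space
--             if current_start is not None:
--                 spans.append({
--                     'start': current_start,
--                     'size': current_size
--                 })
--                 current_start = None
--                 current_size = 0
--
--     # Handle last span if disk ends with free space
--     if current_start is not None: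
--         spans.append({
--             'start': current_start,
--             'size': current_size
--         })
--
--     return spans
-- ===== SOURCE B (Python) =====
-- def find_free_spans(disk):
--     """Find all contiguous free space spans with start position and size."""
--     spans = []
--     pos = 0
--     rest = disk
--     while rest:
--         block = rest[0]
--         run = 1
--         while run < len(rest) and rest[run] == block:
--             run += 1
--         if block == '.':
--             spans.append({'start': pos, 'size': run})
--         pos += run
--         rest = rest[run:]
--     return spans
-- ===== Notes on version B (the rewrite author's own statement) =====
-- stated objective: alternative
-- what changed: Replaces A's per-element state machine (current_start/current_size tracked across an enumerate loop) with a run-wise two-pointer scan that advances over each maximal run of equal blocks at once, emitting a span per '.'-run while keeping a running offset.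
import Mathlib
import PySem

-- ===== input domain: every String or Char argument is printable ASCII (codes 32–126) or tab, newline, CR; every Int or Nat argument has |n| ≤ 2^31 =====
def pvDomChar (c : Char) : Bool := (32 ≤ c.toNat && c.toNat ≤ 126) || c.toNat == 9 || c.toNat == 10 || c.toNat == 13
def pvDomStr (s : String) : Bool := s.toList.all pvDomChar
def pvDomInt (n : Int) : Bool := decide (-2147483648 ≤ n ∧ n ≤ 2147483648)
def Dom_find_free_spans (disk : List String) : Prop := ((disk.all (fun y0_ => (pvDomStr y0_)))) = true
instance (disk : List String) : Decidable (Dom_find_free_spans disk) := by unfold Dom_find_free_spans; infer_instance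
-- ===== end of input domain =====

-- B replaces A's per-element current_start/current_size state machine with a run-wise
-- two-pointer scan over maximal runs of equal blocks (objective: alternative; same results).

-- ===== PORT A =====
-- loop body of A's for-loop (one enumerate step on the state (spans, current_start, current_size))
def pvStepA (st : List (List (String × Int)) × Option Int × Int) (p : Int × String) :
    List (List (String × Int)) × Option Int × Int :=
  if p.2 == "." then
    match st.2.1 with
    | none => (st.1, some p.1, 1)
    | some s => (st.1, some s, st.2.2 + 1)
  else
    match st.2.1 with
    | some s => (st.1 ++ [[("start", s), ("size", st.2.2)]], none, 0)
    | none => st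

-- A's final "handle last span" block
def pvFinA (st : List (List (String × Int)) × Option Int × Int) : List (List (String × Int)) :=
  match st.2.1 with
  | some s => st.1 ++ [[("start", s), ("size", st.2.2)]]
  | none => st.1

def find_free_spans (disk : List String) : List (List (String × Int)) :=
  pvFinA ((PySem.List.enumerate disk 0).foldl pvStepA ([], none, 0))

-- ===== PORT B =====
-- inner while: extend run while rest[run] == block
def pvRunLen (rest : List String) (block : String) (run : Nat) : Nat :=
  if h : run < rest.length ∧ (rest.getD run "" == block) = true then
    pvRunLen rest block (run + 1)
  else run
termination_by rest.length - run
decreasing_by omega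

-- the run never shrinks below its starting index (used only for pvScan's termination)
theorem pvRunLen_ge (rest : List String) (block : String) (run : Nat) :
    run ≤ pvRunLen rest block run := by
  induction run using pvRunLen.induct rest block with
  | case1 run h ih => rw [pvRunLen, dif_pos h]; omega
  | case2 run h => rw [pvRunLen, dif_neg h]

-- outer while over rest, keeping the running offset pos
def pvScan (spans : List (List (String × Int))) (pos : Int) (rest : List String) :
    List (List (String × Int)) :=
  match rest with
  | [] => spans
  | block :: tl =>
    pvScan
      (if block == "." then
        spans ++ [[("start", pos), ("size", (pvRunLen (block :: tl) block 1 : Int))]]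
       else spans)
      (pos + (pvRunLen (block :: tl) block 1 : Int))
      ((block :: tl).drop (pvRunLen (block :: tl) block 1))
termination_by rest.length
decreasing_by
  have h1 : 1 ≤ pvRunLen (block :: tl) block 1 := pvRunLen_ge _ _ 1
  simp [List.length_drop]; omega

def find_free_spans_alt (disk : List String) : List (List (String × Int)) :=
  pvScan [] 0 disk

-- ===== PRECONDITION & SPEC =====
def Spec_find_free_spans (disk : List String) (out : List (List (String × Int))) : Prop := out = find_free_spans_alt disk
instance (disk : List String) (out : List (List (String × Int))) : Decidable (Spec_find_free_spans disk out) := by unfold Spec_find_free_spans; infer_instance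

-- ===== CLAIM (what is proved, stated in full; the proofs are below) =====
def Claim_equal_find_free_spans : Prop := ∀ (disk : List String), Dom_find_free_spans disk → Spec_find_free_spans disk (find_free_spans disk)

-- ===== LEMMAS AND PROOFS =====

-- reference: A's state machine written as structural recursion (pvRef = "outside a free run",
-- pvRefS = "inside a free run that started at s and has size c so far")
mutual
def pvRef : List String → Int → List (List (String × Int))
  | [], _ => []
  | x :: xs, i => if x == "." then pvRefS xs (i + 1) i 1 else pvRef xs (i + 1)
def pvRefS : List String → Int → Int → Int → List (List (String × Int))
  | [], _, s, c => [[("start", s), ("size", c)]]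
  | x :: xs, i, s, c =>
    if x == "." then pvRefS xs (i + 1) s (c + 1)
    else [("start", s), ("size", c)] :: pvRef xs (i + 1)
end

-- A's fold equals the reference, jointly over both states
theorem pvA_joint (l : List String) :
    (∀ (i : Int) (spans : List (List (String × Int))) (c : Int),
       pvFinA ((PySem.List.enumerate l i).foldl pvStepA (spans, none, c)) = spans ++ pvRef l i) ∧
    (∀ (i s c : Int) (spans : List (List (String × Int))),
       pvFinA ((PySem.List.enumerate l i).foldl pvStepA (spans, some s, c)) = spans ++ pvRefS l i s c) := by
  induction l with
  | nil => simp [PySem.List.enumerate_nil, pvFinA, pvRef, pvRefS]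
  | cons x xs ih =>
    constructor
    · intro i spans c
      rw [PySem.List.enumerate_cons, List.foldl_cons]
      by_cases hx : (x == ".") = true
      · have hs : pvStepA (spans, none, c) (i, x) = (spans, some i, 1) := by
          simp [pvStepA, hx]
        rw [hs, ih.2, pvRef, if_pos hx]
      · have hx' : (x == ".") = false := by simpa using hx
        have hs : pvStepA (spans, none, c) (i, x) = (spans, none, c) := by
          simp [pvStepA, hx']
        rw [hs, ih.1, pvRef, if_neg (by simp [hx'])]
    · intro i s c spans
      rw [PySem.List.enumerate_cons, List.foldl_cons]
      by_cases hx : (x == ".") = true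
      · have hs : pvStepA (spans, some s, c) (i, x) = (spans, some s, c + 1) := by
          simp [pvStepA, hx]
        rw [hs, ih.2, pvRefS, if_pos hx]
      · have hx' : (x == ".") = false := by simpa using hx
        have hs : pvStepA (spans, some s, c) (i, x) =
            (spans ++ [[("start", s), ("size", c)]], none, 0) := by
          simp [pvStepA, hx']
        rw [hs, ih.1, pvRefS, if_neg (by simp [hx'])]
        simp

theorem find_free_spans_eq_ref (disk : List String) :
    find_free_spans disk = pvRef disk 0 := by
  simpa using (pvA_joint disk).1 0 [] 0

-- pvRunLen counts the matching prefix of the part after index run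
theorem pvRunLen_eq (rest : List String) (b : String) (run : Nat) :
    pvRunLen rest b run = run + ((rest.drop run).takeWhile (fun y => y == b)).length := by
  induction run using pvRunLen.induct rest b with
  | case1 run h ih =>
    rw [pvRunLen, dif_pos h]
    obtain ⟨hlt, hbeq⟩ := h
    have hd : rest.drop run = rest[run] :: rest.drop (run + 1) := by
      rw [List.drop_eq_getElem_cons hlt]
    have hg : rest.getD run "" = rest[run] := by
      simp [List.getD_eq_getElem?_getD, List.getElem?_eq_getElem hlt]
    rw [hd, List.takeWhile_cons, ih]
    rw [hg] at hbeq
    simp [hbeq]; omega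
  | case2 run h =>
    rw [pvRunLen, dif_neg h]
    rcases Nat.lt_or_ge run rest.length with hlt | hge
    · have hbeq : (rest.getD run "" == b) = false := by
        rcases Bool.eq_false_or_eq_true (rest.getD run "" == b) with ht | hf
        · exact absurd ⟨hlt, ht⟩ h
        · exact hf
      have hd : rest.drop run = rest[run] :: rest.drop (run + 1) := by
        rw [List.drop_eq_getElem_cons hlt]
      have hg : rest.getD run "" = rest[run] := by
        simp [List.getD_eq_getElem?_getD, List.getElem?_eq_getElem hlt]
      rw [hd, List.takeWhile_cons]
      rw [hg] at hbeq
      simp [hbeq]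
    · rw [List.drop_eq_nil_of_le hge]
      simp

-- skipping a maximal run of equal non-dot blocks is what pvRef does one step at a time
theorem pvRef_skip (x : String) (hx : (x == ".") = false) :
    ∀ (l : List String) (j : Int),
      pvRef l j = pvRef (l.dropWhile (fun y => y == x)) (j + ((l.takeWhile (fun y => y == x)).length : Int)) := by
  intro l
  induction l with
  | nil => simp
  | cons y ys ih =>
    intro j
    by_cases hy : (y == x) = true
    · have hyx : y = x := by simpa using hy
      have hyd : (y == ".") = false := by rw [hyx]; exact hx
      rw [List.takeWhile_cons, List.dropWhile_cons]
      simp only [hy, if_pos]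
      rw [pvRef, if_neg (by simp [hyd]), ih (j + 1)]
      congr 1
      simp only [List.length_cons]
      push_cast; ring
    · have hy' : (y == x) = false := by simpa using hy
      rw [List.takeWhile_cons, List.dropWhile_cons]
      simp [hy']
  
-- inside a free run, pvRefS closes the run over the whole matching prefix at once
theorem pvRefS_run :
    ∀ (l : List String) (j s c : Int),
      pvRefS l j s c =
        [("start", s), ("size", c + ((l.takeWhile (fun y => y == ".")).length : Int))] ::
          pvRef (l.dropWhile (fun y => y == ".")) (j + ((l.takeWhile (fun y => y == ".")).length : Int)) := by
  intro l
  induction l with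
  | nil => simp [pvRefS, pvRef]
  | cons y ys ih =>
    intro j s c
    by_cases hy : (y == ".") = true
    · rw [pvRefS, if_pos hy, List.takeWhile_cons, List.dropWhile_cons]
      simp only [hy, if_pos]
      rw [ih (j + 1) s (c + 1)]
      simp only [List.length_cons]
      have e1 : c + 1 + ((List.takeWhile (fun y => y == ".") ys).length : Int) =
          c + (((List.takeWhile (fun y => y == ".") ys).length + 1 : Nat) : Int) := by
        push_cast; ring
      have e2 : j + 1 + ((List.takeWhile (fun y => y == ".") ys).length : Int) =
          j + (((List.takeWhile (fun y => y == ".") ys).length + 1 : Nat) : Int) := by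
        push_cast; ring
      rw [e1, e2]
    · have hy' : (y == ".") = false := by simpa using hy
      rw [pvRefS, if_neg (by simp [hy']), List.takeWhile_cons, List.dropWhile_cons]
      simp only [hy', Bool.false_eq_true, if_false, List.length_nil, Nat.cast_zero, add_zero]
      rw [pvRef, if_neg (by simp [hy'])]

-- B's run-wise scan equals the reference
theorem pvScan_eq (n : Nat) :
    ∀ (l : List String), l.length ≤ n →
      ∀ (spans : List (List (String × Int))) (pos : Int),
        pvScan spans pos l = spans ++ pvRef l pos := by
  induction n with
  | zero =>
    intro l hl spans pos
    have hnil : l = [] := List.length_eq_zero_iff.mp (Nat.le_zero.mp hl)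
    subst hnil
    simp [pvScan, pvRef]
  | succ n ihn =>
    intro l hl spans pos
    match l with
    | [] => simp [pvScan, pvRef]
    | block :: tl =>
      rw [pvScan]
      have hrun : pvRunLen (block :: tl) block 1 =
          1 + (tl.takeWhile (fun y => y == block)).length := by
        rw [pvRunLen_eq]
        simp
      have hsplit : tl = tl.takeWhile (fun y => y == block) ++ tl.dropWhile (fun y => y == block) :=
        (List.takeWhile_append_dropWhile).symm
      have hdrop : (block :: tl).drop (pvRunLen (block :: tl) block 1) =
          tl.dropWhile (fun y => y == block) := by
        rw [hrun, Nat.add_comm, List.drop_succ_cons]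
        nth_rewrite 2 [hsplit]
        rw [List.drop_left]
      have hlen : (tl.dropWhile (fun y => y == block)).length ≤ n := by
        have h1 := List.length_dropWhile_le (fun y => y == block) tl
        have h2 : tl.length + 1 ≤ n + 1 := by simpa using hl
        omega
      rw [hdrop, ihn _ hlen]
      by_cases hb : (block == ".") = true
      · have hb' : block = "." := by simpa using hb
        subst hb'
        rw [pvRef, pvRefS_run tl (pos + 1) pos 1, hrun]
        simp only [if_pos hb]
        push_cast
        rw [show pos + (1 + ((tl.takeWhile (fun y => y == ".")).length : Int)) =
              pos + 1 + ((tl.takeWhile (fun y => y == ".")).length : Int) by ring]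
        simp
      · have hb' : (block == ".") = false := by simpa using hb
        rw [pvRef, if_neg (by simp [hb']), if_neg (by simp [hb'])]
        rw [pvRef_skip block hb' tl (pos + 1), hrun]
        congr 2
        push_cast; ring

-- ===== VERDICT (by name: the statement is the Claim_ definition above) =====
theorem find_free_spans_spec : Claim_equal_find_free_spans := by
  intro disk _
  unfold Spec_find_free_spans find_free_spans_alt
  rw [find_free_spans_eq_ref, pvScan_eq disk.length disk (Nat.le_refl _)]
  simp
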